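-- pv_equiv track=rewrite | github.com/yli12313/Technology-Grand-Challenge | Interview-Prep-2021/Leetcode/Other/CS_array_rearrange.py | solution
-- ===== SOURCE A (Python) =====
-- def solution(a):
--
--     # Approach 1:
--     # - TRICK: You have to construct the array B first. This is NOT a two-pointer problem!
--     # - Step 1: Construct array B.
--     # - Step 2. Loop through B and see if all the elements of the array are increasing.
--
--     n = len(a)
--     count = n-1
--
--     b = [0]*n
--
--     # Make sure to debug with pdb if you can! Test it on Code Signal tomorrow
--     # if you can.
--     # import pdb; pdb.set_trace()
--
--     for i in range(n):
--
--         if i == 0: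
--             b[i] = a[i]
--         # This was tricky. Set a count variable as the last element and
--         # make sure to decrement it each time you find an odd number!
--         elif i%2 != 0:
--             b[i] = a[count]
--             count -= 1
--         elif i%2 == 0:
--             b[i] = a[i//2]
--
--     # Specify the range exactly right here! the cutoff is len(b)-1.
--     # You want to stop 1 BEFORE the last element! The logic is:
--     # 'len(b)-1'.
--     for i in range(0, len(b)-1):
--         # Tricky: Don't forget to include an equals than sign! The
--         # array b has to be in ASCENDING ORDER!
--         if b[i] >= b[i+1]:
--             return False
--
--     return True
-- ===== SOURCE B (Python) =====
-- def solution(a):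
--     n = len(a)
--     half = (n + 1) // 2
--     front = a[:half]
--     back = a[half:][::-1]
--     b = []
--     for x, y in zip(front, back):
--         b.append(x)
--         b.append(y)
--     b.extend(front[len(back):])
--     return all(x < y for x, y in zip(b, b[1:]))
-- ===== Notes on version B (the rewrite author's own statement) =====
-- stated objective: simpler
-- what changed: Replaces A's single index loop with parity branches and a decrementing count variable (writing into a preallocated zero list) by a split-and-merge decomposition: slice the array into its front half and reversed back half, interleave them, and check adjacent pairs directly.
import Mathlib
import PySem

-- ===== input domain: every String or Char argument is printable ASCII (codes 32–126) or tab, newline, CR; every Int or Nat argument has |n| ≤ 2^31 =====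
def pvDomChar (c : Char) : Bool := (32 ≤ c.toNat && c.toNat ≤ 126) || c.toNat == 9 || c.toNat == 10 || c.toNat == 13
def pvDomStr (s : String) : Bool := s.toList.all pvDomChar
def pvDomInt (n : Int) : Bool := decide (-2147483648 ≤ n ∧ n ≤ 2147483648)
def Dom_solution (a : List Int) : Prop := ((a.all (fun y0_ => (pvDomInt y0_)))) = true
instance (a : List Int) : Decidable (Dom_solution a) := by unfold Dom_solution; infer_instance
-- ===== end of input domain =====

-- B replaces A's parity-branching index loop (with a decrementing count variable) by a
-- split-and-merge decomposition: interleave the front half with the reversed back half,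
-- then a direct adjacent-pair strictness check (objective: simpler).

-- ===== PORT A =====
-- one step of A's first loop: b[i] := a[i] / a[count] / a[i//2] by the parity branches
def buildA (a : List Int) (s : List Int × Int) (i : Int) : List Int × Int :=
  if i = 0 then (s.1.set i.toNat (PySem.List.pyGetD a i 0), s.2)
  else if PySem.Int.mod i 2 ≠ 0 then (s.1.set i.toNat (PySem.List.pyGetD a s.2 0), s.2 - 1)
  else (s.1.set i.toNat (PySem.List.pyGetD a (PySem.Int.floordiv i 2) 0), s.2)

-- A's second loop: for i in range(0, len(b)-1): if b[i] >= b[i+1]: return False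
def solChkA (b : List Int) : List Int → Bool
  | [] => true
  | i :: rest =>
    if PySem.List.pyGetD b i 0 ≥ PySem.List.pyGetD b (i + 1) 0 then false
    else solChkA b rest

def solution (a : List Int) : Bool :=
  let n : Int := a.length
  let s := (PySem.List.pyRange 0 n 1).foldl (buildA a) (List.replicate a.length 0, n - 1)
  solChkA s.1 (PySem.List.pyRange 0 (n - 1) 1)

-- ===== PORT B =====
def solution_alt (a : List Int) : Bool :=
  let n : Int := a.length
  let half := PySem.Int.floordiv (n + 1) 2
  let front := PySem.List.slice a none (some half)
  let back := (PySem.List.slice a (some half) none).reverse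
  let b := (front.zip back).foldl (fun acc p => acc ++ [p.1, p.2]) []
      ++ PySem.List.slice front (some (back.length : Int)) none
  (b.zip (PySem.List.slice b (some 1) none)).all (fun p => decide (p.1 < p.2))

-- ===== PRECONDITION & SPEC =====
def Spec_solution (a : List Int) (out : Bool) : Prop := out = solution_alt a
instance (a : List Int) (out : Bool) : Decidable (Spec_solution a out) := by unfold Spec_solution; infer_instance

-- ===== CLAIM (what is proved, stated in full; the proofs are below) =====
def Claim_equal_solution : Prop := ∀ (a : List Int), Dom_solution a → Spec_solution a (solution a)

-- ===== LEMMAS AND PROOFS =====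

-- proof-layer description of B's interleaving and strictness check
def interleaveB : List Int → List Int → List Int
  | [], _ => []
  | f :: fs, [] => f :: interleaveB fs []
  | f :: fs, b :: bs => f :: b :: interleaveB fs bs

def strictIncB : List Int → Bool
  | [] => true
  | [_] => true
  | x :: y :: rest => x < y && strictIncB (y :: rest)

-- the value A's first loop writes at position j (for j < a.length)
def tgtA (a : List Int) (j : Nat) : Int :=
  if j % 2 = 0 then a.getD (j / 2) 0 else a.getD (a.length - 1 - j / 2) 0

theorem getD_set_self (l : List Int) (i : Nat) (v : Int) (h : i < l.length) :
    (l.set i v).getD i 0 = v := by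
  rw [List.getD_eq_getElem _ _ (by simpa using h), List.getElem_set_self]

theorem getD_set_ne (l : List Int) (i j : Nat) (v : Int) (hne : i ≠ j) :
    (l.set i v).getD j 0 = l.getD j 0 := by
  by_cases hj : j < l.length
  · rw [List.getD_eq_getElem _ _ (by simpa using hj), List.getD_eq_getElem _ _ hj,
      List.getElem_set_ne hne]
  · rw [List.getD_eq_default _ _ (by simpa using Nat.le_of_not_lt hj),
      List.getD_eq_default _ _ (Nat.le_of_not_lt hj)]

theorem buildA_inv (a : List Int) (k : Nat) (hk : k ≤ a.length) :
    ((PySem.List.pyRange 0 (k : Int) 1).foldl (buildA a)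
        (List.replicate a.length 0, (a.length : Int) - 1)).1.length = a.length ∧
    ((PySem.List.pyRange 0 (k : Int) 1).foldl (buildA a)
        (List.replicate a.length 0, (a.length : Int) - 1)).2
      = (a.length : Int) - 1 - ((k / 2 : Nat) : Int) ∧
    ∀ j, j < k →
      ((PySem.List.pyRange 0 (k : Int) 1).foldl (buildA a)
          (List.replicate a.length 0, (a.length : Int) - 1)).1.getD j 0 = tgtA a j := by
  induction k with
  | zero =>
    rw [show ((0 : Nat) : Int) = 0 by norm_num, PySem.List.pyRange_one_eq_nil (le_refl 0)]
    refine ⟨by simp, by norm_num, fun j hj => absurd hj (by omega)⟩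
  | succ k ih =>
    obtain ⟨h1, h2, h3⟩ := ih (by omega)
    rw [show ((k + 1 : Nat) : Int) = (k : Int) + 1 by push_cast; ring,
      PySem.List.pyRange_one_succ_right (by positivity), List.foldl_append,
      List.foldl_cons, List.foldl_nil]
    set S := (PySem.List.pyRange 0 (k : Int) 1).foldl (buildA a)
        (List.replicate a.length 0, (a.length : Int) - 1) with hS
    rcases Nat.eq_zero_or_pos k with hk0 | hkpos
    · -- k = 0 : first branch of buildA
      subst hk0
      have hn : 1 ≤ a.length := hk
      have hbr : buildA a S ((0 : Nat) : Int) = (S.1.set 0 (PySem.List.pyGetD a 0 0), S.2) := by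
        norm_num [buildA]
      rw [hbr]
      refine ⟨by simp [h1], by simpa using h2, ?_⟩
      intro j hj
      have hj0 : j = 0 := by omega
      subst hj0
      rw [getD_set_self _ _ _ (by rw [h1]; omega),
        PySem.List.pyGetD_of_nonneg _ _ (le_refl 0)]
      unfold tgtA
      norm_num
    · have hkne : ((k : Nat) : Int) ≠ 0 := by
        simp only [ne_eq, Int.natCast_eq_zero]; omega
      have hmod : PySem.Int.mod ((k : Nat) : Int) 2 = ((k % 2 : Nat) : Int) := by
        exact_mod_cast PySem.Int.mod_natCast k 2
      have htoNat : (((k : Nat) : Int)).toNat = k := Int.toNat_natCast k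
      rcases Nat.even_or_odd k with hev | hod
      · -- k even, k ≠ 0 : third branch
        have hpar : k % 2 = 0 := Nat.even_iff.mp hev
        have hbr : buildA a S ((k : Nat) : Int)
            = (S.1.set k (PySem.List.pyGetD a (PySem.Int.floordiv ((k : Nat) : Int) 2) 0), S.2) := by
          simp only [buildA, if_neg hkne, hmod, hpar, htoNat]
          norm_num
        rw [hbr]
        have hfd : PySem.Int.floordiv ((k : Nat) : Int) 2 = ((k / 2 : Nat) : Int) := by
          exact_mod_cast PySem.Int.floordiv_natCast k 2
        refine ⟨by simp [h1], ?_, ?_⟩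
        · rw [h2]
          have : (k + 1) / 2 = k / 2 := by omega
          rw [this]
        · intro j hj
          rcases Nat.lt_succ_iff_lt_or_eq.mp hj with hjk | hjk
          · rw [getD_set_ne _ _ _ _ (by omega)]
            exact h3 j hjk
          · subst hjk
            rw [getD_set_self _ _ _ (by rw [h1]; omega), hfd,
              PySem.List.pyGetD_of_nonneg _ _ (by positivity), Int.toNat_natCast]
            unfold tgtA
            rw [if_pos hpar]
      · -- k odd : second branch
        have hpar : k % 2 = 1 := Nat.odd_iff.mp hod
        have hbr : buildA a S ((k : Nat) : Int)
            = (S.1.set k (PySem.List.pyGetD a S.2 0), S.2 - 1) := by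
          simp only [buildA, if_neg hkne, hmod, hpar, htoNat]
          norm_num
        rw [hbr]
        have hdle : k / 2 ≤ a.length - 1 := by omega
        have hS2 : (0:Int) ≤ S.2 := by rw [h2]; omega
        have hS2n : S.2.toNat = a.length - 1 - k / 2 := by rw [h2]; omega
        refine ⟨by simp [h1], ?_, ?_⟩
        · rw [h2]
          have : (k + 1) / 2 = k / 2 + 1 := by omega
          rw [this]
          push_cast
          ring
        · intro j hj
          rcases Nat.lt_succ_iff_lt_or_eq.mp hj with hjk | hjk
          · rw [getD_set_ne _ _ _ _ (by omega)]
            exact h3 j hjk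
          · subst hjk
            rw [getD_set_self _ _ _ (by rw [h1]; omega),
              PySem.List.pyGetD_of_nonneg _ _ hS2, hS2n]
            unfold tgtA
            rw [if_neg (by omega)]

theorem interleave_nil (f : List Int) : interleaveB f [] = f := by
  induction f with
  | nil => rfl
  | cons x fs ih => simpa [interleaveB] using ih

theorem interleave_length (f b : List Int) (hb : b.length ≤ f.length) :
    (interleaveB f b).length = f.length + b.length := by
  induction f generalizing b with
  | nil =>
    have hb0 : b = [] := List.eq_nil_of_length_eq_zero (Nat.le_zero.mp (by simpa using hb))
    simp [hb0, interleaveB]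
  | cons x fs ih =>
    cases b with
    | nil => simp [interleave_nil]
    | cons y bs =>
      simp only [interleaveB, List.length_cons]
      have := ih bs (by simpa using Nat.le_of_succ_le_succ hb)
      omega

theorem interleave_getD (f b : List Int) (hb : b.length ≤ f.length)
    (hf : f.length ≤ b.length + 1) :
    ∀ j, j < f.length + b.length →
      (interleaveB f b).getD j 0
        = if j % 2 = 0 then f.getD (j / 2) 0 else b.getD (j / 2) 0 := by
  induction f generalizing b with
  | nil =>
    intro j hj
    have hb0 : b = [] := List.eq_nil_of_length_eq_zero (Nat.le_zero.mp (by simpa using hb))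
    subst hb0
    simp at hj
  | cons x fs ih =>
    intro j hj
    cases b with
    | nil =>
      have hfs : fs = [] := by
        simp only [List.length_cons, List.length_nil] at hb hf
        exact List.eq_nil_of_length_eq_zero (by omega)
      subst hfs
      have hj0 : j = 0 := by simp at hj; omega
      subst hj0
      simp [interleaveB]
    | cons y bs =>
      match j with
      | 0 => simp [interleaveB]
      | 1 => simp [interleaveB]
      | (j + 2) =>
        have h1 : bs.length ≤ fs.length := by simp at hb; omega
        have h2 : fs.length ≤ bs.length + 1 := by simp at hf; omega
        have h3 : j < fs.length + bs.length := by simp at hj; omega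
        have hmod : (j + 2) % 2 = j % 2 := by omega
        have hdiv : (j + 2) / 2 = j / 2 + 1 := by omega
        simp only [interleaveB, List.getD_cons_succ, hmod, hdiv]
        rw [ih bs h1 h2 j h3]

theorem half_cast (n : Nat) :
    PySem.Int.floordiv ((n : Int) + 1) 2 = (((n + 1) / 2 : Nat) : Int) := by
  rw [show ((n : Int) + 1) = ((n + 1 : Nat) : Int) by push_cast; ring]
  exact_mod_cast PySem.Int.floordiv_natCast (n + 1) 2

theorem build_eq_interleave (a : List Int) :
    ((PySem.List.pyRange 0 ((a.length : Int)) 1).foldl (buildA a)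
        (List.replicate a.length 0, (a.length : Int) - 1)).1
      = interleaveB (PySem.List.slice a none (some (PySem.Int.floordiv ((a.length : Int) + 1) 2)))
          ((PySem.List.slice a (some (PySem.Int.floordiv ((a.length : Int) + 1) 2)) none).reverse) := by
  obtain ⟨H1, H2, H3⟩ := buildA_inv a a.length (le_refl _)
  rw [half_cast a.length, PySem.List.slice_to _ (by positivity),
    PySem.List.slice_from _ (by positivity), Int.toNat_natCast]
  set n := a.length with hn
  set h := (n + 1) / 2 with hh
  have hhn : h ≤ n := by omega
  have lf : (a.take h).length = h := by simp [hn.symm]; omega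
  have lb : ((a.drop h).reverse).length = n - h := by simp [hn.symm]
  have hb' : ((a.drop h).reverse).length ≤ (a.take h).length := by rw [lf, lb]; omega
  have hf' : (a.take h).length ≤ ((a.drop h).reverse).length + 1 := by rw [lf, lb]; omega
  apply List.ext_getElem
  · rw [H1, interleave_length _ _ hb', lf, lb]; omega
  · intro i hi1 hi2
    have hin : i < n := by rw [H1] at hi1; exact hi1
    have hA := (List.getD_eq_getElem _ 0 hi1).symm.trans (H3 i hin)
    have hB := (List.getD_eq_getElem _ 0 hi2).symm.trans
      (interleave_getD (a.take h) ((a.drop h).reverse) hb' hf' i (by rw [lf, lb]; omega))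
    rw [hA, hB]
    unfold tgtA
    by_cases hpar : i % 2 = 0
    · rw [if_pos hpar, if_pos hpar]
      have hlt : i / 2 < h := by omega
      rw [List.getD_eq_getElem a 0 (show i / 2 < a.length by omega),
        List.getD_eq_getElem (a.take h) 0 (by rw [lf]; exact hlt), List.getElem_take]
    · rw [if_neg hpar, if_neg hpar]
      have hlt : i / 2 < n - h := by omega
      rw [List.getD_eq_getElem a 0 (show n - 1 - i / 2 < a.length by omega),
        List.getD_eq_getElem ((a.drop h).reverse) 0 (by rw [lb]; exact hlt),
        List.getElem_reverse, List.getElem_drop]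
      congr 1
      simp only [List.length_drop]
      omega

theorem pyRange_shift (m : Int) :
    PySem.List.pyRange 1 (m + 1) 1 = (PySem.List.pyRange 0 m 1).map (· + 1) := by
  rw [PySem.List.pyRange_one, PySem.List.pyRange_one, List.map_map]
  have : (m + 1 - 1).toNat = (m - 0).toNat := by omega
  rw [this]
  exact List.map_congr_left fun x _ => by simp [Function.comp]; ring

theorem pyGetD_cons_shift (x : Int) (b : List Int) (i : Int) (hi : 0 ≤ i) :
    PySem.List.pyGetD (x :: b) (i + 1) 0 = PySem.List.pyGetD b i 0 := by
  rw [PySem.List.pyGetD_of_nonneg _ _ (by omega), PySem.List.pyGetD_of_nonneg _ _ hi]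
  have : (i + 1).toNat = i.toNat + 1 := by omega
  rw [this, List.getD_cons_succ]

theorem solChkA_shift (x : Int) (b : List Int) :
    ∀ l, (∀ i ∈ l, (0:Int) ≤ i) → solChkA (x :: b) (l.map (· + 1)) = solChkA b l := by
  intro l
  induction l with
  | nil => intro _; rfl
  | cons i l' ih =>
    intro h
    have hi : (0:Int) ≤ i := h i (List.mem_cons_self ..)
    simp only [List.map_cons, solChkA]
    rw [pyGetD_cons_shift x b i hi]
    have : i + 1 + 1 = (i + 1) + 1 := rfl
    rw [this, pyGetD_cons_shift x b (i + 1) (by omega)]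
    rw [ih (fun j hj => h j (List.mem_cons_of_mem _ hj))]

theorem chk_eq (b : List Int) :
    solChkA b (PySem.List.pyRange 0 ((b.length : Int) - 1) 1) = strictIncB b := by
  induction b with
  | nil =>
    rw [PySem.List.pyRange_one_eq_nil (by norm_num)]
    rfl
  | cons x tail ih =>
    cases tail with
    | nil =>
      rw [show (((x :: ([] : List Int)).length : Int) - 1) = 0 by simp,
        PySem.List.pyRange_one_eq_nil (le_refl 0)]
      rfl
    | cons y r =>
      rw [show (((x :: y :: r).length : Int) - 1) = (r.length : Int) + 1 by simp only [List.length_cons]; push_cast; ring,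
        PySem.List.pyRange_one_cons (by positivity)]
      simp only [solChkA, zero_add]
      have h0 : PySem.List.pyGetD (x :: y :: r) 0 0 = x := by
        rw [PySem.List.pyGetD_of_nonneg _ _ (by norm_num)]; rfl
      have h1 : PySem.List.pyGetD (x :: y :: r) 1 0 = y := by
        rw [PySem.List.pyGetD_of_nonneg _ _ (by norm_num)]; rfl
      rw [h0, h1]
      by_cases hxy : x ≥ y
      · rw [if_pos hxy]
        have hnlt : ¬ x < y := by omega
        simp [strictIncB, hnlt]
      · rw [if_neg hxy]
        rw [pyRange_shift, solChkA_shift x (y :: r) _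
          (fun i hi => ((PySem.List.mem_pyRange_one).1 hi).1)]
        rw [show ((r.length : Int)) = ((y :: r).length : Int) - 1 by simp, ih]
        have hlt : x < y := by omega
        simp [strictIncB, hlt]

theorem flat_eq_interleave (f b : List Int) (hb : b.length ≤ f.length) :
    (f.zip b).flatMap (fun p => [p.1, p.2]) ++ f.drop b.length = interleaveB f b := by
  induction f generalizing b with
  | nil =>
    have hb0 : b = [] := List.eq_nil_of_length_eq_zero (Nat.le_zero.mp (by simpa using hb))
    simp [hb0, interleaveB]
  | cons x fs ih =>
    cases b with
    | nil => simp [interleave_nil]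
    | cons y bs =>
      have := ih bs (by simp at hb; omega)
      simp only [List.zip_cons_cons, List.flatMap_cons, List.length_cons, List.drop_succ_cons, interleaveB,
        List.cons_append, List.nil_append]
      rw [this]

theorem allzip_eq (b : List Int) :
    (b.zip b.tail).all (fun p => decide (p.1 < p.2)) = strictIncB b := by
  induction b with
  | nil => rfl
  | cons x tail ih =>
    cases tail with
    | nil => rfl
    | cons y r =>
      have ih' : ((y :: r).zip r).all (fun p => decide (p.1 < p.2)) = strictIncB (y :: r) := ih
      simp only [List.tail_cons, List.zip_cons_cons, List.all_cons] at ih' ⊢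
      rw [ih']
      rfl

-- ===== VERDICT (by name: the statement is the Claim_ definition above) =====
theorem solution_spec : Claim_equal_solution := by
  intro a _
  unfold Spec_solution solution solution_alt
  simp only []
  rw [build_eq_interleave]
  set f := PySem.List.slice a none (some (PySem.Int.floordiv ((a.length : Int) + 1) 2)) with hf
  set bk := (PySem.List.slice a (some (PySem.Int.floordiv ((a.length : Int) + 1) 2)) none).reverse
    with hbk
  have hlens : f.length = (a.length + 1) / 2 ∧ bk.length = a.length - (a.length + 1) / 2 := by
    rw [hf, hbk, half_cast a.length, PySem.List.slice_to _ (by positivity),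
      PySem.List.slice_from _ (by positivity), Int.toNat_natCast]
    simp
    omega
  have hble : bk.length ≤ f.length := by omega
  have hB : ((f.zip bk).foldl (fun acc p => acc ++ [p.1, p.2]) []
        ++ PySem.List.slice f (some (bk.length : Int)) none) = interleaveB f bk := by
    rw [PySem.List.foldl_append_eq_flatMap (fun p => [p.1, p.2]) (f.zip bk) [],
      PySem.List.slice_from _ (by positivity), Int.toNat_natCast, List.nil_append]
    exact flat_eq_interleave f bk hble
  rw [hB, PySem.List.slice_from_one, allzip_eq]
  have hlen : (interleaveB f bk).length = a.length := by
    rw [interleave_length _ _ hble]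
    omega
  have key : ∀ (L : List Int), L.length = a.length →
      solChkA L (PySem.List.pyRange 0 ((a.length : Int) - 1) 1) = strictIncB L := by
    intro L hL
    rw [← hL]
    exact chk_eq L
  exact key _ hlen
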